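-- pv_equiv track=rewrite | github.com/SomyotSW/sas-qc-gearmotor | utils/ik_translator.py | translate_options
-- ===== SOURCE A (Python) =====
-- def translate_options(brand: str, options: list) -> list:
--     """
--     Normalize option codes across brands to SAS option letters.
--
--     SAS options: T (terminal), F (fan), FF (forced fan), P (thermal), M (brake)
--     """
--     result = []
--     for opt in options:
--         opt_up = opt.upper() if isinstance(opt, str) else str(opt)
--
--         if brand in ("sas", "zd", "suntech"):
--             # already SAS
--             result.append(opt_up)
--             continue
--
--         if brand == "oriental":
--             if opt_up == "F":
--                 result.append("F")
--             elif opt_up == "T":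
--                 result.append("T")
--             continue
--
--         if brand == "spg":
--             # SPG special types → SAS
--             if opt_up == "E":
--                 result.append("M")    # E = Electromagnetic brake → SAS M
--             elif opt_up in ("T", "T1", "T2"):
--                 result.append("T")    # terminal box variants → T
--             # B (semi-brake), S12/S24 (speed controller), V12, ES — skipped
--             continue
--
--         if brand == "panasonic":
--             if opt_up == "SEALED_CONNECTOR":
--                 pass  # SAS has no sealed connector option → skip
--             continue
--
--     # De-dup while preserving order
--     seen = set()
--     out = []
--     for x in result:
--         if x not in seen:
--             seen.add(x)
--             out.append(x)
--     return out
-- ===== SOURCE B (Python) =====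
-- PASSTHROUGH = frozenset({"sas", "zd", "suntech"})
-- OPTION_MAP = {
--     ("oriental", "F"): "F",
--     ("oriental", "T"): "T",
--     ("spg", "E"): "M",
--     ("spg", "T"): "T",
--     ("spg", "T1"): "T",
--     ("spg", "T2"): "T",
-- }
--
--
-- def _translate(brand, opt):
--     opt_up = opt.upper() if isinstance(opt, str) else str(opt)
--     if brand in PASSTHROUGH:
--         return opt_up
--     return OPTION_MAP.get((brand, opt_up))
--
--
-- def translate_options(brand: str, options: list) -> list:
--     # Build the answer back-to-front: prepend each translated option and drop
--     # its later duplicates, so the first occurrence wins without a seen-set.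
--     out = []
--     for opt in reversed(options):
--         v = _translate(brand, opt)
--         if v is not None:
--             out = [v] + [x for x in out if x != v]
--     return out
-- ===== Notes on version B (the rewrite author's own statement) =====
-- stated objective: alternative
-- what changed: B traverses the options in reverse, prepending each translated value and filtering its later duplicates out of the accumulator, so first-occurrence dedup emerges without a seen-set or a second pass; the per-brand if/elif chains become one flat (brand, option) lookup table plus a passthrough set.
import Mathlib
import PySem

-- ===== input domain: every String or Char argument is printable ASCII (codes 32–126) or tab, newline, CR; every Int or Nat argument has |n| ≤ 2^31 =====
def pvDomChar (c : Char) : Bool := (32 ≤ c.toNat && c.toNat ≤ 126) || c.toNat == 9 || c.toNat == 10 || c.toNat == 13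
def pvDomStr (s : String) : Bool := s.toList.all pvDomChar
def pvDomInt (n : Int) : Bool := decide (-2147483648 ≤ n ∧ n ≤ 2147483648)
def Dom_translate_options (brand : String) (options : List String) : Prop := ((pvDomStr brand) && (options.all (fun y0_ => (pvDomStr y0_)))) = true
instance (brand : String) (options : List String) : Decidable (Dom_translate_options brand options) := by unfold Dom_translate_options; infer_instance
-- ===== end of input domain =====

-- B builds the answer back-to-front (prepend each value, filter its later duplicates), no seen-set and no second pass; same return value.

-- ===== PORT A =====
-- A: first pass builds `result` via per-brand if/elif chains, second pass dedups with a seen-set preserving order.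
def translate_options (brand : String) (options : List String) : List String :=
  let result := options.foldl (fun result opt =>
    let opt_up := PySem.Str.upper opt
    if brand == "sas" || brand == "zd" || brand == "suntech" then
      result ++ [opt_up]
    else if brand == "oriental" then
      (if opt_up == "F" then result ++ ["F"]
       else if opt_up == "T" then result ++ ["T"]
       else result)
    else if brand == "spg" then
      (if opt_up == "E" then result ++ ["M"]
       else if opt_up == "T" || opt_up == "T1" || opt_up == "T2" then result ++ ["T"]
       else result)
    else
      result) []
  (result.foldl (fun (st : PySem.Set String × List String) x =>
      if st.1.contains x then st else (st.1.add x, st.2 ++ [x]))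
    (PySem.Set.empty, [])).2

-- ===== PORT B =====
def pvPassthrough : PySem.Set String := PySem.Set.ofList ["sas", "zd", "suntech"]

def pvOptionMap : PySem.Dict (String × String) String :=
  PySem.Dict.ofList
    [(("oriental", "F"), "F"),
     (("oriental", "T"), "T"),
     (("spg", "E"), "M"),
     (("spg", "T"), "T"),
     (("spg", "T1"), "T"),
     (("spg", "T2"), "T")]

-- Source B's _translate
def pvTranslate (brand : String) (opt : String) : Option String :=
  let opt_up := PySem.Str.upper opt
  if pvPassthrough.contains brand then some opt_up
  else pvOptionMap.get? (brand, opt_up)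

-- B: reversed traversal, prepend each value and filter its later duplicates out of the accumulator.
def translate_options_alt (brand : String) (options : List String) : List String :=
  options.reverse.foldl (fun out opt =>
    match pvTranslate brand opt with
    | none => out
    | some v => v :: out.filter (fun x => x != v)) []

-- ===== PRECONDITION & SPEC =====
def Spec_translate_options (brand : String) (options : List String) (out : List String) : Prop := out = translate_options_alt brand options
instance (brand : String) (options : List String) (out : List String) : Decidable (Spec_translate_options brand options out) := by unfold Spec_translate_options; infer_instance

-- ===== CLAIM (what is proved, stated in full; the proofs are below) =====
def Claim_equal_translate_options : Prop := ∀ (brand : String) (options : List String), Dom_translate_options brand options → Spec_translate_options brand options (translate_options brand options)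

-- ===== LEMMAS AND PROOFS =====

/-- The per-option mapped value both programs agree on. -/
def pvVal (brand opt_up : String) : Option String :=
  if brand == "sas" || brand == "zd" || brand == "suntech" then some opt_up
  else if brand == "oriental" then
    (if opt_up == "F" then some "F" else if opt_up == "T" then some "T" else none)
  else if brand == "spg" then
    (if opt_up == "E" then some "M"
     else if opt_up == "T" || opt_up == "T1" || opt_up == "T2" then some "T"
     else none)
  else none

/-- First-occurrence dedup, recursively: keep the head, drop its copies from the deduped tail. -/
def pvRDedup : List String → List String
  | [] => []
  | x :: xs => x :: (pvRDedup xs).filter (fun y => y != x)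

/-- One step of A's seen-set dedup. -/
def pvPush (st : PySem.Set String × List String) (x : String) : PySem.Set String × List String :=
  if st.1.contains x then st else (st.1.add x, st.2 ++ [x])

lemma pvA_fold (brand : String) (options : List String) (r : List String) :
    options.foldl (fun result opt =>
      let opt_up := PySem.Str.upper opt
      if brand == "sas" || brand == "zd" || brand == "suntech" then
        result ++ [opt_up]
      else if brand == "oriental" then
        (if opt_up == "F" then result ++ ["F"]
         else if opt_up == "T" then result ++ ["T"]
         else result)
      else if brand == "spg" then
        (if opt_up == "E" then result ++ ["M"]
         else if opt_up == "T" || opt_up == "T1" || opt_up == "T2" then result ++ ["T"]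
         else result)
      else
        result) r
    = r ++ options.flatMap (fun opt => (pvVal brand (PySem.Str.upper opt)).toList) := by
  induction options generalizing r with
  | nil => simp
  | cons o rest ih =>
      rw [List.foldl_cons, ih, List.flatMap_cons, ← List.append_assoc]
      congr 1
      simp only [pvVal]
      split_ifs <;> simp

lemma pvNeSymm {a b : String} (h : ¬ a = b) : ¬ b = a := fun e => h e.symm

/-- Source B's flat table lookup computes the same mapped value as A's if/elif chains. -/
lemma pvT_core (brand u : String) :
    (if pvPassthrough.contains brand then some u else pvOptionMap.get? (brand, u))
      = pvVal brand u := by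
  by_cases hs : brand = "sas"
  · subst hs; rfl
  by_cases hz : brand = "zd"
  · subst hz; rfl
  by_cases hv : brand = "suntech"
  · subst hv; rfl
  have hpt : pvPassthrough.contains brand = false := by
    have h : pvPassthrough = ["sas", "zd", "suntech"] := by decide
    simp [h, PySem.Set.contains, hs, hz, hv]
  have hmap : pvOptionMap = PySem.Dict.mk
      [(("oriental", "F"), "F"), (("oriental", "T"), "T"),
       (("spg", "E"), "M"), (("spg", "T"), "T"),
       (("spg", "T1"), "T"), (("spg", "T2"), "T")] := by decide
  have hmk : ∀ x, (PySem.Dict.mk ([] : List ((String × String) × String))).get? x = none :=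
    fun _ => rfl
  rw [hpt, if_neg (by simp), hmap]
  by_cases ho : brand = "oriental"
  · subst ho
    by_cases hF : u = "F"
    · subst hF; decide
    by_cases hT : u = "T"
    · subst hT; decide
    simp [pvVal, PySem.Dict.get?_mk_cons, hmk, Prod.ext_iff, hF, hT, pvNeSymm hF, pvNeSymm hT]
  by_cases hg : brand = "spg"
  · subst hg
    by_cases hE : u = "E"
    · subst hE; decide
    by_cases hT : u = "T"
    · subst hT; decide
    by_cases h1 : u = "T1"
    · subst h1; decide
    by_cases h2 : u = "T2"
    · subst h2; decide
    simp [pvVal, PySem.Dict.get?_mk_cons, hmk, Prod.ext_iff, hE, hT, h1, h2,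
      pvNeSymm hE, pvNeSymm hT, pvNeSymm h1, pvNeSymm h2]
  simp [pvVal, PySem.Dict.get?_mk_cons, hmk, Prod.ext_iff, hs, hz, hv, ho, hg,
    pvNeSymm ho, pvNeSymm hg]

lemma pvT_eq (brand opt : String) :
    pvTranslate brand opt = pvVal brand (PySem.Str.upper opt) :=
  pvT_core brand (PySem.Str.upper opt)

/-- A's seen-set fold equals the recursive first-occurrence dedup (relative to the seen set). -/
lemma pvDedFold (l : List String) (s : PySem.Set String) (acc : List String) :
    (l.foldl pvPush (s, acc)).2
      = acc ++ (pvRDedup l).filter (fun y => !s.contains y) := by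
  induction l generalizing s acc with
  | nil => simp [pvRDedup]
  | cons x xs ih =>
      rw [List.foldl_cons]
      by_cases hx : x ∈ s
      · have hc : s.contains x = true := by simpa using hx
        rw [show pvPush (s, acc) x = (s, acc) from by simp [pvPush, hx], ih]
        congr 1
        simp only [pvRDedup, List.filter_cons, List.filter_filter, hc, Bool.not_true,
          Bool.false_eq_true, if_false]
        apply List.filter_congr
        intro a _
        by_cases ha : a ∈ s
        · simp [ha]
        · have hax : a ≠ x := fun e => ha (e ▸ hx)
          simp [ha, hax]
      · have hc : s.contains x = false := by simpa using hx
        rw [show pvPush (s, acc) x = (s.add x, acc ++ [x]) from by simp [pvPush, hx], ih]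
        simp only [pvRDedup, List.filter_cons, List.filter_filter, hc, Bool.not_false, if_true,
          List.append_assoc, List.singleton_append]
        congr 2
        apply List.filter_congr
        intro a _
        by_cases hax : a = x
        · simp [hax, PySem.Set.mem_add]
        · by_cases ha : a ∈ s <;> simp [PySem.Set.mem_add, ha, hax]

/-- B equals the recursive dedup of the mapped stream. -/
lemma pvB_eq (brand : String) (options : List String) :
    translate_options_alt brand options
      = pvRDedup (options.flatMap (fun opt => (pvVal brand (PySem.Str.upper opt)).toList)) := by
  unfold translate_options_alt
  rw [List.foldl_reverse]
  induction options with
  | nil => rfl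
  | cons o rest ih =>
      rw [List.foldr_cons, ih, List.flatMap_cons, pvT_eq]
      cases pvVal brand (PySem.Str.upper o) <;> simp [pvRDedup]

theorem pv_main (brand : String) (options : List String) :
    translate_options brand options = translate_options_alt brand options := by
  unfold translate_options
  rw [pvA_fold, List.nil_append]
  show (List.foldl pvPush (PySem.Set.empty, [])
      (options.flatMap (fun opt => (pvVal brand (PySem.Str.upper opt)).toList))).2 = _
  rw [pvDedFold, pvB_eq, List.nil_append]
  have h : (fun y => !(PySem.Set.empty : PySem.Set String).contains y) = fun _ => true := by
    funext y; rfl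
  rw [h, List.filter_true]

-- ===== VERDICT (by name: the statement is the Claim_ definition above) =====
theorem translate_options_spec : Claim_equal_translate_options := by
  intro brand options _
  unfold Spec_translate_options
  exact pv_main brand options
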